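-- pv_equiv track=rewrite | github.com/any020/INFO132 | any020_5_2.py | funksjon2
-- ===== SOURCE A (Python) =====
-- def funksjon2(minListe):
--     count = 0
--     for teller in minListe:
--         if teller == 0:
--             break
--         else:
--             count += teller
--     return (count)
-- ===== SOURCE B (Python) =====
-- def funksjon2(minListe):
--     if 0 in minListe:
--         return sum(minListe[:minListe.index(0)])
--     return sum(minListe)
-- ===== Notes on version B (the rewrite author's own statement) =====
-- stated objective: simpler
-- what changed: Replaces the fused accumulate-with-break loop by two separate phases: locate the first zero with membership/index, then sum the slice before it (or the whole list if no zero).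
import Mathlib
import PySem

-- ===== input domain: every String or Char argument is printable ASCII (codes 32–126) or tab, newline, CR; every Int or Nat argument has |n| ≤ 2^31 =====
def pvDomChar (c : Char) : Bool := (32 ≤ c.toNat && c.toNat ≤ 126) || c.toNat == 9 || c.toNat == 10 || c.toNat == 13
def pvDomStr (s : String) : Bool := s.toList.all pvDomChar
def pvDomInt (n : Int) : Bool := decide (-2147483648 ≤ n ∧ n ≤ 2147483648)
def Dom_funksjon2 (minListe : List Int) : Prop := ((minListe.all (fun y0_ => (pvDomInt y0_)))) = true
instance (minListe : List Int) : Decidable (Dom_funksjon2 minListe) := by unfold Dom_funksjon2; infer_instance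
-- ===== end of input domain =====

-- B changes the structure (locate the first zero, then sum the prefix) for clarity; same return value.

-- ===== PORT A =====
-- the for-loop with break, as structural recursion over the list with the accumulator 'count'
def funksjon2Go (rest : List Int) (count : Int) : Int :=
  match rest with
  | [] => count
  | teller :: rest' => if teller = 0 then count else funksjon2Go rest' (count + teller)

def funksjon2 (minListe : List Int) : Int := funksjon2Go minListe 0

-- ===== PORT B =====
def funksjon2_alt (minListe : List Int) : Int :=
  if (0 : Int) ∈ minListe then
    match PySem.List.index? minListe (0 : Int) with
    | some k => (PySem.List.slice minListe none (some (k : Int))).sum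
    | none => minListe.sum   -- unreachable: membership holds
  else minListe.sum

-- ===== PRECONDITION & SPEC =====
def Spec_funksjon2 (minListe : List Int) (out : Int) : Prop := out = funksjon2_alt minListe
instance (minListe : List Int) (out : Int) : Decidable (Spec_funksjon2 minListe out) := by unfold Spec_funksjon2; infer_instance

-- ===== CLAIM (what is proved, stated in full; the proofs are below) =====
def Claim_equal_funksjon2 : Prop := ∀ (minListe : List Int), Dom_funksjon2 minListe → Spec_funksjon2 minListe (funksjon2 minListe)

-- ===== LEMMAS AND PROOFS =====
lemma funksjon2_alt_cons_ne (x : Int) (xs : List Int) (hx : x ≠ 0) :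
    funksjon2_alt (x :: xs) = x + funksjon2_alt xs := by
  by_cases h : (0 : Int) ∈ xs
  · have h0 : (0 : Int) ∈ x :: xs := List.mem_cons_of_mem _ h
    obtain ⟨k, hk⟩ := (PySem.List.index?_isSome_iff (xs := xs) (v := (0:Int))).2 h
      |> Option.isSome_iff_exists.1
    have hcons : PySem.List.index? (x :: xs) (0 : Int) = some (k + 1) := by
      rw [PySem.List.index?_cons_of_ne xs hx, hk]; rfl
    simp only [funksjon2_alt, if_pos h0, if_pos h, hcons, hk]
    rw [PySem.List.slice_to_natCast, PySem.List.slice_to_natCast]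
    simp [List.take_succ_cons]
  · have hcx : (0 : Int) ∈ x :: xs ↔ False := by simp [List.mem_cons, hx.symm, h]
    have hidx : PySem.List.index? (x :: xs) (0 : Int) = none := by
      rw [PySem.List.index?_eq_none_iff]; simp [hcx]
    simp [funksjon2_alt, hcx, h]

lemma funksjon2Go_eq (xs : List Int) : ∀ c : Int, funksjon2Go xs c = c + funksjon2_alt xs := by
  induction xs with
  | nil => intro c; simp [funksjon2Go, funksjon2_alt]
  | cons x xs ih =>
    intro c
    by_cases hx : x = 0
    · subst hx
      have h0 : (0 : Int) ∈ (0 : Int) :: xs := List.mem_cons_self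
      have halt : funksjon2_alt ((0 : Int) :: xs) = 0 := by
        rw [funksjon2_alt, if_pos h0, PySem.List.index?_cons_self]
        simp [PySem.List.slice]
      simp [funksjon2Go, halt]
    · rw [funksjon2_alt_cons_ne x xs hx]
      simp only [funksjon2Go, if_neg hx]
      rw [ih (c + x)]; ring

-- ===== VERDICT (by name: the statement is the Claim_ definition above) =====
theorem funksjon2_spec : Claim_equal_funksjon2 := by
  intro minListe _
  show funksjon2 minListe = funksjon2_alt minListe
  rw [funksjon2, funksjon2Go_eq]; ring
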